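-- pv_equiv track=rewrite | github.com/ZosiaZamoyska/algorithms | solutions/introduction/Leader Search/PrefixLeader.py | find_prefix_leader
-- ===== SOURCE A (Python) =====
-- def find_prefix_leader(n, arr):
--     candidate, count = None, 0
--     leader_candidates = []
--     prefix_counts = {}
--     prefix_leader_count = {}
--
--     for i in range(n):
--         num = arr[i]
--         prefix_counts[num] = prefix_counts.get(num, 0) + 1
--
--         if count == 0:
--             candidate = num
--             count = 1
--         else:
--             count += 1 if num == candidate else -1
--
--         if prefix_counts[candidate] > (i + 1) // 2:
--             leader_candidates.append(candidate)
--             prefix_leader_count[candidate] = prefix_leader_count.get(candidate, 0) + 1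
--         else:
--             leader_candidates.append(-1)
--
--     candidate, count = None, 0
--     for num in leader_candidates:
--         if count == 0:
--             candidate = num
--         count += 1 if num == candidate else -1
--
--     if candidate == -1 or prefix_leader_count.get(candidate, 0) <= n // 2:
--         return -1
--
--     return candidate
-- ===== SOURCE B (Python) =====
-- def find_prefix_leader(n, arr):
--     # Track the verified prefix leader directly (no Boyer-Moore at all):
--     # the leader of prefix i+1, if any, is either arr[i] or the leader of prefix i.
--     counts = {}
--     wins = {}
--     leader = None
--     for i in range(n):
--         num = arr[i]
--         counts[num] = counts.get(num, 0) + 1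
--         half = (i + 1) // 2
--         if counts[num] > half:
--             leader = num
--         elif leader is None or counts[leader] <= half:
--             leader = None
--         if leader is not None:
--             wins[leader] = wins.get(leader, 0) + 1
--     # a value with > n//2 wins is unique; scan the dict once
--     for v, c in wins.items():
--         if c > n // 2:
--             return v
--     return -1
-- ===== Notes on version B (the rewrite author's own statement) =====
-- stated objective: alternative
-- what changed: B drops Boyer-Moore voting entirely: it tracks the verified prefix leader directly (the new prefix leader can only be the new element or the previous leader), counts wins per leader, and ends with a single scan of the wins dict for the unique key with count > n//2, replacing both of A's Boyer-Moore passes and the leader_candidates list.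
-- outside the precondition, e.g. on find_prefix_leader(-1, []): A returns None, B returns -1
import Mathlib
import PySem

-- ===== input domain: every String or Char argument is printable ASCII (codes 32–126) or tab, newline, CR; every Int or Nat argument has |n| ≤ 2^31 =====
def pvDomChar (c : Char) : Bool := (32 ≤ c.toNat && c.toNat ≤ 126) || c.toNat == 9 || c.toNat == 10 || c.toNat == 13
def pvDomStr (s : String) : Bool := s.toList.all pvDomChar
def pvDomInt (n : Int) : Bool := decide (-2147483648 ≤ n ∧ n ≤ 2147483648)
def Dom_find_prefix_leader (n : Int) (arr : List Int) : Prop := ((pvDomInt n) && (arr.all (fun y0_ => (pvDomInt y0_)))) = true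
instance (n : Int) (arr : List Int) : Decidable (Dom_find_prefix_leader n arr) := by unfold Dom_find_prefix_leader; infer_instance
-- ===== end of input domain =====

-- B drops Boyer-Moore voting entirely: it tracks the verified prefix leader directly (the new
-- prefix leader can only be the new element or the previous leader) and ends with one scan of
-- the wins dict for the unique key with count > n//2 (an alternative algorithm, same cost).


-- ===== PORT A =====
-- loop-1 state: (candidate, count, leader_candidates, prefix_counts, prefix_leader_count)
def aStep1 (arr : List Int)
    (st : Option Int × Int × List Int × PySem.Dict Int Int × PySem.Dict Int Int) (i : Int) :
    Option Int × Int × List Int × PySem.Dict Int Int × PySem.Dict Int Int :=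
  match st with
  | (cand, cnt, lc, pc, plc) =>
    let num := (PySem.List.pyGet? arr i).getD 0   -- arr[i]; Pre_ keeps i in range
    let pc := pc.insert num (pc.getD num 0 + 1)
    let (cand, cnt) :=
      if cnt = 0 then (some num, (1 : Int))
      else (cand, cnt + if some num = cand then 1 else -1)
    match cand with
    | some c =>
      if PySem.Int.floordiv (i + 1) 2 < pc.getD c 0 then
        (some c, cnt, lc ++ [c], pc, plc.insert c (plc.getD c 0 + 1))
      else
        (some c, cnt, lc ++ [-1], pc, plc)
    | none => (none, cnt, lc, pc, plc)   -- unreachable: cand is some after the branch above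

-- loop-2 state: (candidate, count)
def aStep2 (st : Option Int × Int) (num : Int) : Option Int × Int :=
  match st with
  | (cand, cnt) =>
    let cand := if cnt = 0 then some num else cand
    (cand, cnt + if some num = cand then 1 else -1)

def find_prefix_leader (n : Int) (arr : List Int) : Int :=
  let st := (PySem.List.pyRange 0 n 1).foldl (aStep1 arr)
              (none, 0, [], PySem.Dict.empty, PySem.Dict.empty)
  let lc := st.2.2.1
  let plc := st.2.2.2.2
  let r := lc.foldl aStep2 (none, 0)
  match r.1 with
  | none => -1   -- candidate is None: with 0 ≤ n Python's final test holds and returns -1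
  | some c => if c = -1 ∨ plc.getD c 0 ≤ PySem.Int.floordiv n 2 then -1 else c

-- ===== PORT B =====
-- loop state: (leader, counts, wins) — no Boyer-Moore candidate, no leader_candidates list
def bStep (arr : List Int)
    (st : Option Int × PySem.Dict Int Int × PySem.Dict Int Int) (i : Int) :
    Option Int × PySem.Dict Int Int × PySem.Dict Int Int :=
  match st with
  | (leader, counts, wins) =>
    let num := (PySem.List.pyGet? arr i).getD 0
    let counts := counts.insert num (counts.getD num 0 + 1)
    let half := PySem.Int.floordiv (i + 1) 2
    let leader :=
      if half < counts.getD num 0 then some num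
      else match leader with
        | none => none
        | some l => if counts.getD l 0 ≤ half then none else some l
    match leader with
    | some l => (some l, counts, wins.insert l (wins.getD l 0 + 1))
    | none => (none, counts, wins)

-- 'for v, c in wins.items(): if c > n//2: return v' then 'return -1'
def bScan (n : Int) : List (Int × Int) → Int
  | [] => -1
  | (k, v) :: rest => if PySem.Int.floordiv n 2 < v then k else bScan n rest

def find_prefix_leader_alt (n : Int) (arr : List Int) : Int :=
  let st := (PySem.List.pyRange 0 n 1).foldl (bStep arr)
              (none, PySem.Dict.empty, PySem.Dict.empty)
  bScan n st.2.2.items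

-- ===== PRECONDITION & SPEC =====
-- Pre_ excludes n > len(arr), where A raises IndexError, and n < 0, where A returns None
-- instead of an int (B returns -1 there, see the claim's cites).
def Pre_find_prefix_leader (n : Int) (arr : List Int) : Prop := 0 ≤ n ∧ n ≤ (arr.length : Int)
instance (n : Int) (arr : List Int) : Decidable (Pre_find_prefix_leader n arr) := by
  unfold Pre_find_prefix_leader; infer_instance
def pvWitness_find_prefix_leader : Int × List Int := (3, [2, 2, 1])

def Spec_find_prefix_leader (n : Int) (arr : List Int) (out : Int) : Prop := out = find_prefix_leader_alt n arr
instance (n : Int) (arr : List Int) (out : Int) : Decidable (Spec_find_prefix_leader n arr out) := by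
  unfold Spec_find_prefix_leader; infer_instance

-- ===== CLAIM (what is proved, stated in full; the proofs are below) =====
def Claim_equal_find_prefix_leader : Prop := ∀ (n : Int) (arr : List Int), Dom_find_prefix_leader n arr → Pre_find_prefix_leader n arr → Spec_find_prefix_leader n arr (find_prefix_leader n arr)

-- ===== LEMMAS AND PROOFS =====

lemma count_add_count_le_length (l : List Int) (a b : Int) (hab : a ≠ b) :
    l.count a + l.count b ≤ l.length := by
  induction l with
  | nil => simp
  | cons x xs ih =>
    simp only [List.count_cons, List.length_cons, beq_iff_eq]
    by_cases h1 : x = a <;> by_cases h2 : x = b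
    · exact absurd (h1.symm.trans h2) hab
    · rw [if_pos h1, if_neg h2]; omega
    · rw [if_pos h2, if_neg h1]; omega
    · rw [if_neg h1, if_neg h2]; omega

lemma aStep2_eq (cand : Option Int) (cnt num : Int) :
    aStep2 (cand, cnt) num =
      if cnt = 0 then (some num, 1)
      else (cand, cnt + if some num = cand then 1 else -1) := by
  by_cases h : cnt = 0 <;> simp [aStep2, h]

lemma bm_inv (l : List Int) :
    0 ≤ (l.foldl aStep2 (none, 0)).2 ∧
    ∀ v, 2 * (l.count v : Int) ≤ (l.length : Int) - (l.foldl aStep2 (none, 0)).2 +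
      (if (l.foldl aStep2 (none, 0)).1 = some v then 2 * (l.foldl aStep2 (none, 0)).2 else 0) := by
  induction l using List.reverseRecOn with
  | nil => simp
  | append_singleton xs x ih =>
    obtain ⟨h0, hinv⟩ := ih
    rw [List.foldl_append, List.foldl_cons, List.foldl_nil]
    set st := xs.foldl aStep2 (none, 0) with hst
    obtain ⟨cand, cnt⟩ := st
    simp only at h0 hinv
    rw [aStep2_eq]
    by_cases hc : cnt = 0
    · rw [if_pos hc]
      refine ⟨by norm_num, fun v => ?_⟩
      have hvq := hinv v
      have hv : 2 * (List.count v xs : Int) ≤ (xs.length : Int) := by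
        rw [hc] at hvq; split_ifs at hvq <;> omega
      simp only [List.count_append, List.length_append, List.count_singleton,
        List.length_singleton]
      by_cases hvx : x = v
      · rw [if_pos (by simp [hvx] : (x == v) = true),
          if_pos (by rw [hvx] : some x = some v)]
        push_cast; omega
      · rw [if_neg (by simp [hvx] : ¬ (x == v) = true),
          if_neg (by simp [hvx] : ¬ some x = some v)]
        push_cast; omega
    · rw [if_neg hc]
      refine ⟨?_, fun v => ?_⟩
      · simp only; split_ifs <;> omega
      · have hv := hinv v
        simp only [List.count_append, List.length_append, List.count_singleton,
          List.length_singleton]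
        by_cases hcx : some x = cand
        · rw [if_pos hcx]
          by_cases hcv : cand = some v
          · have hxv : x = v := Option.some.inj (hcx.trans hcv)
            rw [if_pos hcv] at hv
            rw [if_pos hcv, if_pos (by simp [hxv] : (x == v) = true)]
            push_cast; omega
          · have hxv : ¬ (x == v) = true := by
              intro hb
              exact hcv (hcx ▸ (by simp [beq_iff_eq.mp hb]))
            rw [if_neg hcv] at hv
            rw [if_neg hcv, if_neg hxv]
            push_cast; omega
        · rw [if_neg hcx]
          by_cases hcv : cand = some v
          · have hxv : ¬ (x == v) = true := by
              intro hb
              exact hcx (by rw [hcv]; simp [beq_iff_eq.mp hb])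
            rw [if_pos hcv] at hv
            rw [if_pos hcv, if_neg hxv]
            push_cast; omega
          · rw [if_neg hcv] at hv
            rw [if_neg hcv]
            by_cases hvx : x = v
            · rw [if_pos (by simp [hvx] : (x == v) = true)]; push_cast; omega
            · rw [if_neg (by simp [hvx] : ¬ (x == v) = true)]; push_cast; omega

lemma bm_correct (l : List Int) (v : Int) (hlen : (l.length : Int) < 2 * (l.count v : Int)) :
    (l.foldl aStep2 (none, 0)).1 = some v := by
  obtain ⟨h0, hinv⟩ := bm_inv l
  have := hinv v
  by_contra hne
  rw [if_neg hne] at this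
  omega

lemma bScan_spec (n : Int) (items : List (Int × Int)) :
    (bScan n items = -1 ∧ ∀ p ∈ items, ¬ PySem.Int.floordiv n 2 < p.2) ∨
    (∃ p ∈ items, PySem.Int.floordiv n 2 < p.2 ∧ bScan n items = p.1) := by
  induction items with
  | nil => left; exact ⟨rfl, by simp⟩
  | cons p rest ih =>
    obtain ⟨k, v⟩ := p
    by_cases h : PySem.Int.floordiv n 2 < v
    · right
      exact ⟨(k, v), by simp, h, by rw [bScan, if_pos h]⟩
    · rcases ih with ⟨h1, h2⟩ | ⟨q, hq, hqv, hqs⟩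
      · left
        refine ⟨by rw [bScan, if_neg h]; exact h1, ?_⟩
        intro p hp
        rcases List.mem_cons.1 hp with rfl | hp
        · exact h
        · exact h2 p hp
      · right
        exact ⟨q, List.mem_cons_of_mem _ hq, hqv, by rw [bScan, if_neg h]; exact hqs⟩

-- aStep1 expressed through the Boyer-Moore step aStep2 (same candidate/count update)
lemma aStep1_eq (arr : List Int) (cand : Option Int) (cnt : Int) (lc : List Int)
    (pc plc : PySem.Dict Int Int) (i : Int) :
    aStep1 arr (cand, cnt, lc, pc, plc) i =
      (let num := (PySem.List.pyGet? arr i).getD 0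
       let pc' := pc.insert num (pc.getD num 0 + 1)
       let s := aStep2 (cand, cnt) num
       match s.1 with
       | some c =>
         if PySem.Int.floordiv (i + 1) 2 < pc'.getD c 0 then
           (some c, s.2, lc ++ [c], pc', plc.insert c (plc.getD c 0 + 1))
         else (some c, s.2, lc ++ [-1], pc', plc)
       | none => (none, s.2, lc, pc', plc)) := by
  by_cases h : cnt = 0
  · simp [aStep1, aStep2, h]
  · cases cand <;> simp [aStep1, aStep2, h]

lemma plc_step_qual (lc : List Int) (plc : PySem.Dict Int Int) (x : Int)
    (h3 : ∀ v, v ≠ -1 → (lc.count v : Int) = plc.getD v 0)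
    (h4 : plc.getD (-1) 0 ≤ (lc.count (-1) : Int)) :
    (∀ v, v ≠ -1 → ((lc ++ [x]).count v : Int) = (plc.insert x (plc.getD x 0 + 1)).getD v 0) ∧
    ((plc.insert x (plc.getD x 0 + 1)).getD (-1) 0 ≤ ((lc ++ [x]).count (-1) : Int)) := by
  constructor
  · intro v hv
    rw [List.count_append, List.count_singleton, PySem.Dict.getD_insert]
    have h := h3 v hv
    by_cases hvx : v = x
    · subst hvx
      rw [if_pos rfl, if_pos (by simp)]
      push_cast; omega
    · rw [if_neg hvx, if_neg (by simpa using Ne.symm hvx)]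
      push_cast; omega
  · rw [List.count_append, List.count_singleton, PySem.Dict.getD_insert]
    by_cases h1x : (-1 : Int) = x
    · subst h1x
      rw [if_pos rfl, if_pos (by simp)]
      push_cast; omega
    · rw [if_neg h1x, if_neg (by simpa using Ne.symm h1x)]
      push_cast; omega

lemma plc_step_nq (lc : List Int) (plc : PySem.Dict Int Int)
    (h3 : ∀ v, v ≠ -1 → (lc.count v : Int) = plc.getD v 0)
    (h4 : plc.getD (-1) 0 ≤ (lc.count (-1) : Int)) :
    (∀ v, v ≠ -1 → ((lc ++ [-1]).count v : Int) = plc.getD v 0) ∧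
    (plc.getD (-1) 0 ≤ ((lc ++ [-1]).count (-1) : Int)) := by
  constructor
  · intro v hv
    rw [List.count_append, List.count_singleton, if_neg (by simpa using Ne.symm hv)]
    simpa using h3 v hv
  · rw [List.count_append, List.count_singleton, if_pos (by simp)]
    push_cast; omega

lemma insert_off_keys (plc : PySem.Dict Int Int) (x w : Int)
    (h6 : ∀ v, v ∉ plc.keys → plc.getD v 0 = 0) :
    ∀ v, v ∉ (plc.insert x w).keys → (plc.insert x w).getD v 0 = 0 := by
  intro v hv
  rw [PySem.Dict.mem_keys_insert] at hv
  push_neg at hv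
  rw [PySem.Dict.getD_insert, if_neg hv.1]
  exact h6 v hv.2

lemma A_inv (arr : List Int) (m : Nat) (hm : m ≤ arr.length) :
    (let A := (PySem.List.pyRange 0 (m : Int) 1).foldl (aStep1 arr)
                (none, 0, [], PySem.Dict.empty, PySem.Dict.empty)
     (A.1 = none → A.2.1 = 0) ∧
     A.2.2.1.length = m ∧
     (∀ v, v ≠ -1 → (A.2.2.1.count v : Int) = A.2.2.2.2.getD v 0) ∧
     (A.2.2.2.2.getD (-1) 0 ≤ (A.2.2.1.count (-1) : Int)) ∧
     A.2.2.2.2.keys.Nodup ∧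
     (∀ v, v ∉ A.2.2.2.2.keys → A.2.2.2.2.getD v 0 = 0)) := by
  induction m with
  | zero =>
    simp [PySem.List.pyRange_one_eq_nil (by norm_num : (0:Int) ≤ 0), PySem.Dict.getD_empty,
      PySem.Dict.keys_empty]
  | succ m ih =>
    have hm' : m < arr.length := hm
    obtain ⟨ih1, ih2, ih3, ih4, ih5, ih6⟩ := ih (Nat.le_of_lt hm')
    have hsplit : PySem.List.pyRange 0 ((m + 1 : Nat) : Int) 1 =
        PySem.List.pyRange 0 (m : Int) 1 ++ [(m : Int)] := by
      push_cast
      exact PySem.List.pyRange_one_succ_right (by positivity)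
    rw [hsplit, List.foldl_append, List.foldl_cons, List.foldl_nil]
    set A := (PySem.List.pyRange 0 (m : Int) 1).foldl (aStep1 arr)
      (none, 0, [], PySem.Dict.empty, PySem.Dict.empty) with hA
    obtain ⟨cand, cnt, lc, pc, plc⟩ := A
    simp only at ih1 ih2 ih3 ih4 ih5 ih6 ⊢
    rw [aStep1_eq]
    simp only
    set s := aStep2 (cand, cnt) ((PySem.List.pyGet? arr (m : Int)).getD 0) with hs
    cases hs1 : s.1 with
    | none =>
      exfalso
      rw [hs, aStep2_eq] at hs1
      by_cases hc : cnt = 0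
      · rw [if_pos hc] at hs1; simp at hs1
      · rw [if_neg hc] at hs1
        simp only at hs1
        exact absurd (ih1 hs1) hc
    | some c =>
      simp only
      split_ifs with hq
      · obtain ⟨c3, c4⟩ := plc_step_qual lc plc c ih3 ih4
        exact ⟨fun h => by simp at h, by simp [ih2], c3, c4,
          PySem.Dict.nodup_keys_insert _ _ _ ih5, insert_off_keys plc _ _ ih6⟩
      · obtain ⟨c3, c4⟩ := plc_step_nq lc plc ih3 ih4
        exact ⟨fun h => by simp at h, by simp [ih2], c3, c4, ih5, ih6⟩

-- the joint invariant: B's counts/wins mirror A's prefix_counts/prefix_leader_count,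
-- A's (candidate,count) is the Boyer-Moore fold over the prefix, prefix_counts holds the
-- multiplicities of the prefix, and B's leader is exactly the strict-majority element (if any)
lemma AB_inv (arr : List Int) (m : Nat) (hm : m ≤ arr.length) :
    (let A := (PySem.List.pyRange 0 (m : Int) 1).foldl (aStep1 arr)
                (none, 0, [], PySem.Dict.empty, PySem.Dict.empty)
     let B := (PySem.List.pyRange 0 (m : Int) 1).foldl (bStep arr)
                (none, PySem.Dict.empty, PySem.Dict.empty)
     B.2.1 = A.2.2.2.1 ∧
     B.2.2 = A.2.2.2.2 ∧
     (A.1, A.2.1) = (arr.take m).foldl aStep2 (none, 0) ∧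
     (∀ v, A.2.2.2.1.getD v 0 = ((arr.take m).count v : Int)) ∧
     (∀ v, B.1 = some v ↔ ((m : Int) / 2 < ((arr.take m).count v : Int)))) := by
  induction m with
  | zero =>
    refine ⟨rfl, rfl, ?_, ?_, ?_⟩ <;>
      simp [PySem.List.pyRange_one_eq_nil (by norm_num : (0:Int) ≤ 0), PySem.Dict.getD_empty]
  | succ m ih =>
    have hm' : m < arr.length := hm
    obtain ⟨ih1, ih2, ih3, ih4, ih5⟩ := ih (Nat.le_of_lt hm')
    have hsplit : PySem.List.pyRange 0 ((m + 1 : Nat) : Int) 1 =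
        PySem.List.pyRange 0 (m : Int) 1 ++ [(m : Int)] := by
      push_cast
      exact PySem.List.pyRange_one_succ_right (by positivity)
    rw [hsplit, List.foldl_append, List.foldl_cons, List.foldl_nil,
      List.foldl_append, List.foldl_cons, List.foldl_nil]
    set A := (PySem.List.pyRange 0 (m : Int) 1).foldl (aStep1 arr)
      (none, 0, [], PySem.Dict.empty, PySem.Dict.empty) with hA
    set B := (PySem.List.pyRange 0 (m : Int) 1).foldl (bStep arr)
      (none, PySem.Dict.empty, PySem.Dict.empty) with hB
    obtain ⟨candA, cntA, lc, pc, plc⟩ := A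
    obtain ⟨lead, cts, wins⟩ := B
    simp only at ih1 ih2 ih3 ih4 ih5 ⊢
    subst ih2
    subst ih1
    have hnum : (PySem.List.pyGet? arr (m : Int)).getD 0 = arr[m] := by
      simp [PySem.List.pyGet?_natCast, List.getElem?_eq_getElem hm']
    have htake : arr.take (m + 1) = arr.take m ++ [arr[m]] := by
      rw [List.take_succ, List.getElem?_eq_getElem hm']
      rfl
    -- arithmetic facts about halves
    have hhalf : PySem.Int.floordiv ((m : Int) + 1) 2 = ((m : Int) + 1) / 2 :=
      PySem.Int.floordiv_eq_ediv_of_pos (by norm_num)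
    -- counts of the new prefix
    have hcount' : ∀ v, (cts.insert arr[m] (cts.getD arr[m] 0 + 1)).getD v 0 =
        ((arr.take (m + 1)).count v : Int) := by
      intro v
      rw [PySem.Dict.getD_insert, htake, List.count_append, List.count_singleton]
      by_cases hv : v = arr[m]
      · rw [if_pos hv, if_pos (by simp [hv]), ih4, hv]; push_cast; omega
      · rw [if_neg hv, if_neg (by simpa using Ne.symm hv), ih4]; push_cast; omega
    -- uniqueness of a strict-majority element of the new prefix
    have hlen' : (arr.take (m + 1)).length = m + 1 := List.length_take_of_le hm'
    have huniq : ∀ v w, ((m : Int) + 1) / 2 < ((arr.take (m + 1)).count v : Int) →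
        ((m : Int) + 1) / 2 < ((arr.take (m + 1)).count w : Int) → v = w := by
      intro v w hv hw
      by_contra hvw
      have h3 := count_add_count_le_length (arr.take (m + 1)) v w hvw
      rw [hlen'] at h3
      omega
    -- now do the simultaneous step
    rw [aStep1_eq]
    simp only [bStep, hnum]
    set s := aStep2 (candA, cntA) arr[m] with hsdef
    have hsfold : s = (arr.take (m + 1)).foldl aStep2 (none, 0) := by
      rw [hsdef, htake, List.foldl_append, List.foldl_cons, List.foldl_nil, ← ih3]
    -- if the new prefix has a strict majority v, A's new candidate is v
    have hbmmaj : ∀ v, ((m : Int) + 1) / 2 < ((arr.take (m + 1)).count v : Int) →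
        s.1 = some v := by
      intro v hv
      rw [hsfold]
      apply bm_correct
      rw [hlen']
      push_cast
      omega
    -- characterize B's new leader
    have hmaj : ∀ v,
        (if PySem.Int.floordiv ((m : Int) + 1) 2 <
              (cts.insert arr[m] (cts.getD arr[m] 0 + 1)).getD arr[m] 0 then some arr[m]
         else match lead with
           | none => none
           | some l => if (cts.insert arr[m] (cts.getD arr[m] 0 + 1)).getD l 0 ≤
                 PySem.Int.floordiv ((m : Int) + 1) 2 then none else some l) = some v ↔
        (((m : Int) + 1) / 2 < ((arr.take (m + 1)).count v : Int)) := by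
      intro v
      rw [hhalf]
      by_cases hq : ((m : Int) + 1) / 2 < ((arr.take (m + 1)).count arr[m] : Int)
      · rw [if_pos (by rw [hcount' arr[m]]; exact hq)]
        constructor
        · intro h
          obtain rfl := Option.some.inj h
          exact hq
        · intro hv
          exact congrArg some (huniq _ _ hq hv)
      · rw [if_neg (by rw [hcount' arr[m]]; exact hq)]
        have hcarry : ∀ w, ((m : Int) + 1) / 2 < ((arr.take (m + 1)).count w : Int) →
            lead = some w := by
          intro w hw
          have hwm : w ≠ arr[m] := fun h => hq (h ▸ hw)
          rw [(ih5 w)]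
          have : (arr.take (m + 1)).count w = (arr.take m).count w := by
            rw [htake, List.count_append, List.count_singleton,
              if_neg (by simpa using Ne.symm hwm)]
            simp
          rw [this] at hw
          omega
        cases lead with
        | none =>
          simp only
          constructor
          · intro h; exact absurd h (by simp)
          · intro hv; exact absurd (hcarry v hv) (by simp)
        | some l =>
          simp only
          by_cases hl : ((m : Int) + 1) / 2 < ((arr.take (m + 1)).count l : Int)
          · rw [if_neg (by rw [hcount' l]; omega)]
            constructor
            · intro h
              obtain rfl := Option.some.inj h
              exact hl
            · intro hv
              exact hcarry v hv
          · rw [if_pos (by rw [hcount' l]; omega)]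
            constructor
            · intro h; exact absurd h (by simp)
            · intro hv
              have := hcarry v hv
              obtain rfl := Option.some.inj this
              exact absurd hv hl
    by_cases hex : ∃ v, ((m : Int) + 1) / 2 < ((arr.take (m + 1)).count v : Int)
    · obtain ⟨v, hv⟩ := hex
      have hs1 : s.1 = some v := hbmmaj v hv
      have hlead : (if PySem.Int.floordiv ((m : Int) + 1) 2 <
            (cts.insert arr[m] (cts.getD arr[m] 0 + 1)).getD arr[m] 0 then some arr[m]
          else match lead with
            | none => none
            | some l => if (cts.insert arr[m] (cts.getD arr[m] 0 + 1)).getD l 0 ≤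
                  PySem.Int.floordiv ((m : Int) + 1) 2 then none else some l) = some v :=
        (hmaj v).2 hv
      rw [hs1, hlead]
      simp only
      have hqA : PySem.Int.floordiv ((m : Int) + 1) 2 <
          (cts.insert arr[m] (cts.getD arr[m] 0 + 1)).getD v 0 := by
        rw [hhalf, hcount' v]; exact hv
      rw [if_pos hqA]
      refine ⟨rfl, rfl, ?_, hcount', ?_⟩
      · rw [← hsfold]
        exact Prod.ext_iff.2 ⟨hs1.symm, rfl⟩
      · intro w
        constructor
        · intro h
          obtain rfl := Option.some.inj h
          exact_mod_cast hv
        · intro hw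
          exact congrArg some (huniq v w hv (by exact_mod_cast hw))
    · push_neg at hex
      have hlead : (if PySem.Int.floordiv ((m : Int) + 1) 2 <
            (cts.insert arr[m] (cts.getD arr[m] 0 + 1)).getD arr[m] 0 then some arr[m]
          else match lead with
            | none => none
            | some l => if (cts.insert arr[m] (cts.getD arr[m] 0 + 1)).getD l 0 ≤
                  PySem.Int.floordiv ((m : Int) + 1) 2 then none else some l) = none := by
        cases h : (if PySem.Int.floordiv ((m : Int) + 1) 2 <
            (cts.insert arr[m] (cts.getD arr[m] 0 + 1)).getD arr[m] 0 then some arr[m]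
          else match lead with
            | none => none
            | some l => if (cts.insert arr[m] (cts.getD arr[m] 0 + 1)).getD l 0 ≤
                  PySem.Int.floordiv ((m : Int) + 1) 2 then none else some l) with
        | none => rfl
        | some w => exact absurd ((hmaj w).1 h) (not_lt.2 (hex w))
      rw [hlead]
      cases hs1 : s.1 with
      | none =>
        refine ⟨rfl, rfl, ?_, hcount', ?_⟩
        · rw [← hsfold]
          exact Prod.ext_iff.2 ⟨hs1.symm, rfl⟩
        · intro w
          constructor
          · intro h; exact absurd h (by simp)
          · intro hw
            exact absurd (show ((m : Int) + 1) / 2 <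
              ((arr.take (m + 1)).count w : Int) by exact_mod_cast hw) (not_lt.2 (hex w))
      | some c =>
        have hqA : ¬ PySem.Int.floordiv ((m : Int) + 1) 2 <
            (cts.insert arr[m] (cts.getD arr[m] 0 + 1)).getD c 0 := by
          rw [hhalf, hcount' c]; exact not_lt.2 (hex c)
        simp only
        rw [if_neg hqA]
        refine ⟨rfl, rfl, ?_, hcount', ?_⟩
        · rw [← hsfold]
          exact Prod.ext_iff.2 ⟨hs1.symm, rfl⟩
        · intro w
          constructor
          · intro h; exact absurd h (by simp)
          · intro hw
            exact absurd (show ((m : Int) + 1) / 2 <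
              ((arr.take (m + 1)).count w : Int) by exact_mod_cast hw) (not_lt.2 (hex w))

-- ===== VERDICT (by name: the statement is the Claim_ definition above) =====
theorem find_prefix_leader_spec : Claim_equal_find_prefix_leader := by
  intro n arr _ hpre
  obtain ⟨hn0, hnlen⟩ := hpre
  unfold Spec_find_prefix_leader
  have hn : n = ((n.toNat : Nat) : Int) := (Int.toNat_of_nonneg hn0).symm
  set m := n.toNat with hmdef
  have hmlen : m ≤ arr.length := by omega
  obtain ⟨ih1, ih2, ih3, ih4, ih5, ih6⟩ := A_inv arr m hmlen
  obtain ⟨j1, j2, j3, j4, j5⟩ := AB_inv arr m hmlen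
  simp only [find_prefix_leader, find_prefix_leader_alt]
  rw [hn]
  set A := (PySem.List.pyRange 0 (m : Int) 1).foldl (aStep1 arr)
    (none, 0, [], PySem.Dict.empty, PySem.Dict.empty) with hA
  set B := (PySem.List.pyRange 0 (m : Int) 1).foldl (bStep arr)
    (none, PySem.Dict.empty, PySem.Dict.empty) with hB
  rw [j2]
  set lc := A.2.2.1 with hlc
  set plc := A.2.2.2.2 with hplc
  -- arithmetic form of n // 2
  have hq : PySem.Int.floordiv (m : Int) 2 = (m : Int) / 2 :=
    PySem.Int.floordiv_eq_ediv_of_pos (by norm_num)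
  have hq0 : 0 ≤ (m : Int) / 2 := Int.ediv_nonneg (by positivity) (by norm_num)
  have hgle : ∀ v, plc.getD v 0 ≤ (lc.count v : Int) := by
    intro v
    by_cases hv : v = -1
    · subst hv; exact ih4
    · exact le_of_eq (ih3 v hv).symm
  have huniq : ∀ v w, (m : Int) / 2 < plc.getD v 0 → (m : Int) / 2 < plc.getD w 0 → v = w := by
    intro v w hv hw
    by_contra hvw
    have h1 := hgle v
    have h2 := hgle w
    have h3 := count_add_count_le_length lc v w hvw
    omega
  have hitem_val : ∀ p ∈ plc.items, p.2 = plc.getD p.1 0 := by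
    intro p hp
    obtain ⟨k, v⟩ := p
    exact (PySem.Dict.getD_of_mem_items plc hp ih5 0).symm
  have hmem_items : ∀ v, 0 < plc.getD v 0 → (v, plc.getD v 0) ∈ plc.items := by
    intro v hv
    have hvk : v ∈ plc.keys := by
      by_contra hk
      rw [ih6 v hk] at hv
      omega
    rw [PySem.Dict.items_eq_map_keys plc ih5 0]
    exact List.mem_map_of_mem hvk
  rcases bScan_spec (m : Int) plc.items with ⟨hb, hnone⟩ | ⟨p, hp, hpv, hbs⟩
  · rw [hb]
    have hno : ∀ v, plc.getD v 0 ≤ PySem.Int.floordiv (m : Int) 2 := by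
      intro v
      by_contra hlt
      push_neg at hlt
      have h0v : 0 < plc.getD v 0 := by rw [hq] at hlt; omega
      exact hnone _ (hmem_items v h0v) (by simpa using hlt)
    cases hr : (lc.foldl aStep2 (none, 0)).1 with
    | none => simp
    | some c => simp only; rw [if_pos (Or.inr (hno c))]
  · have hpq : PySem.Int.floordiv (m : Int) 2 < plc.getD p.1 0 := (hitem_val p hp) ▸ hpv
    rw [hbs]
    by_cases hneg : p.1 = -1
    · rw [hneg]
      cases hr : (lc.foldl aStep2 (none, 0)).1 with
      | none => simp
      | some c =>
        simp only
        by_cases hcq : PySem.Int.floordiv (m : Int) 2 < plc.getD c 0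
        · have : c = p.1 := huniq c p.1 (hq ▸ hcq) (hq ▸ hpq)
          rw [if_pos (Or.inl (this.trans hneg))]
        · push_neg at hcq
          rw [if_pos (Or.inr hcq)]
    · have hcnt : (lc.count p.1 : Int) = plc.getD p.1 0 := ih3 p.1 hneg
      have hbm : (lc.foldl aStep2 (none, 0)).1 = some p.1 := by
        apply bm_correct
        rw [hq] at hpq
        rw [ih2]
        omega
      rw [hbm]
      simp only
      rw [if_neg (by push_neg; exact ⟨hneg, by omega⟩)]
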